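-- pv_equiv track=rewrite | github.com/thom7e/Python | AOC/2021/day-10.py | check_corrupted
-- ===== SOURCE A (Python) =====
-- open = ["[","<","(","{"]
--
-- def replace(linez):
--     combs = ["[]", "<>", "()", "{}"]
--     for comb in combs:
--         linez = linez.replace(comb, "")
--     return linez
--
-- def rekursion(line):
--     new_line = replace(line)
--     if len(replace(line)) == len(line):
--         return replace(line)
--     else:
--         return rekursion(new_line)
--
-- def check_corrupted(line):
--     checker = []
--     for x in rekursion(line):
--         if x not in open:
--             checker.append("x")
--         else:
--             checker.append("y")
--     if len(set(checker)) == 1: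
--         return ""
--     else:
--         return str(line)
-- ===== SOURCE B (Python) =====
-- def check_corrupted(line):
--     # Single-pass stack reduction instead of A's repeated str.replace passes.
--     pairs = {"]": "[", ">": "<", ")": "(", "}": "{"}
--     stack = []
--     for ch in line:
--         if stack and pairs.get(ch) == stack[-1]:
--             stack.pop()
--         else:
--             stack.append(ch)
--     if not stack:
--         return line
--     openers = "[<({"
--     if all(c in openers for c in stack) or all(c not in openers for c in stack):
--         return ""
--     return line
-- ===== Notes on version B (the rewrite author's own statement) =====
-- stated objective: alternative
-- what changed: B replaces A's loop of repeated str.replace passes (rekursion) with a single left-to-right stack reduction that computes the same irreducible residue in one pass, then classifies it the same way.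
import Mathlib
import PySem

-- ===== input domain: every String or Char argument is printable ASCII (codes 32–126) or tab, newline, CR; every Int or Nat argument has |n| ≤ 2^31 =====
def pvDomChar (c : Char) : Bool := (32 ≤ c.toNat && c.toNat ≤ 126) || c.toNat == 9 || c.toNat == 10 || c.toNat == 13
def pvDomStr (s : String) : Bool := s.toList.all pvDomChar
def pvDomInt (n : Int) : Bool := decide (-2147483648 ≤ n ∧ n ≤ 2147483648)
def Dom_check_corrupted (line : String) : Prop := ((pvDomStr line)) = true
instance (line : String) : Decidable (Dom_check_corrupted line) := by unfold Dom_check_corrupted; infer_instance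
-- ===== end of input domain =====

-- B computes the same irreducible residue by a single-pass stack reduction instead of A's repeated str.replace passes; same return value.

-- ===== PORT A =====
-- `myrepl a b l` is a plain recursive characterisation of Python's `l.replace(a+b, "")`;
-- the port needs it (via `replaceA_len_le`) only for the termination proof of `rekursionA`.
def myrepl (a b : Char) : List Char → List Char
  | [] => []
  | [c] => [c]
  | c :: d :: t => if c = a ∧ d = b then myrepl a b t else c :: myrepl a b (d :: t)

theorem go_eq (a b : Char) : ∀ (fuel : Nat) (l acc : List Char), l.length ≤ fuel →
    PySem.Chars.replace.go [a,b] [] fuel l acc = acc.reverse ++ myrepl a b l := by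
  intro fuel
  induction fuel with
  | zero => intro l acc h; simp at h; subst h; simp [PySem.Chars.replace.go, myrepl]
  | succ n ih =>
    intro l acc h
    match l with
    | [] => simp [PySem.Chars.replace.go, myrepl]
    | [c] =>
      rw [PySem.Chars.replace.go]
      have : [a,b].isPrefixOf [c] = false := by simp [List.isPrefixOf]
      simp only [this, Bool.false_eq_true, if_false]
      rw [ih [] (c :: acc) (by simp)]
      simp [myrepl]
    | c :: d :: t =>
      rw [PySem.Chars.replace.go]
      by_cases hp : c = a ∧ d = b
      · have : [a,b].isPrefixOf (c :: d :: t) = true := by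
          simp [List.isPrefixOf, hp.1, hp.2]
        simp only [this, if_true]
        rw [show List.drop [a,b].length (c :: d :: t) = t by simp]
        rw [ih t ([].reverse ++ acc) (by simp at h ⊢; omega)]
        simp [myrepl, hp]
      · have : [a,b].isPrefixOf (c :: d :: t) = false := by
          simp [List.isPrefixOf]; tauto
        simp only [this, Bool.false_eq_true, if_false]
        rw [ih (d :: t) (c :: acc) (by simp at h ⊢; omega)]
        simp [myrepl, hp]

theorem replace_eq (a b : Char) (l : List Char) :
    PySem.Chars.replace l [a,b] [] = myrepl a b l := by
  rw [PySem.Chars.replace]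
  simp only [List.isEmpty_cons, Bool.false_eq_true, if_false]
  exact go_eq a b l.length l [] (le_refl _)

theorem myrepl_len_le (a b : Char) (l : List Char) : (myrepl a b l).length ≤ l.length := by
  fun_induction myrepl a b l with
  | case1 => simp
  | case2 => simp
  | case3 c d t hp ih => simp; omega
  | case4 c d t hp ih => simp at ih ⊢; omega

def openA : List Char := ['[', '<', '(', '{']

def replaceA (linez : List Char) : List Char :=
  let combs : List (List Char) := ["[]".toList, "<>".toList, "()".toList, "{}".toList]
  combs.foldl (fun lz comb => PySem.Chars.replace lz comb []) linez

theorem replaceA_unfold (l : List Char) :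
    replaceA l = myrepl '{' '}' (myrepl '(' ')' (myrepl '<' '>' (myrepl '[' ']' l))) := by
  simp [replaceA, List.foldl, replace_eq]

theorem replaceA_len_le (l : List Char) : (replaceA l).length ≤ l.length := by
  rw [replaceA_unfold]
  calc (myrepl '{' '}' (myrepl '(' ')' (myrepl '<' '>' (myrepl '[' ']' l)))).length
      ≤ (myrepl '(' ')' (myrepl '<' '>' (myrepl '[' ']' l))).length := myrepl_len_le _ _ _
    _ ≤ (myrepl '<' '>' (myrepl '[' ']' l)).length := myrepl_len_le _ _ _
    _ ≤ (myrepl '[' ']' l).length := myrepl_len_le _ _ _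
    _ ≤ l.length := myrepl_len_le _ _ _

def rekursionA (line : List Char) : List Char :=
  let new_line := replaceA line
  if (replaceA line).length = line.length then replaceA line
  else rekursionA new_line
termination_by line.length
decreasing_by
  exact lt_of_le_of_ne (replaceA_len_le line) (by assumption)

def check_corrupted (line : String) : String :=
  let checker : List String :=
    (rekursionA line.toList).foldl
      (fun acc x => acc ++ [if !(openA.contains x) then "x" else "y"]) []
  if (PySem.Set.ofList checker).length = 1 then "" else line

-- ===== PORT B =====
def pairsB (c : Char) : Option Char :=
  if c = ']' then some '[' else if c = '>' then some '<'
  else if c = ')' then some '(' else if c = '}' then some '{' else none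

-- the stack is kept top-first (cons = push)
def stepB (st : List Char) (ch : Char) : List Char :=
  match st with
  | top :: rest => if pairsB ch = some top then rest else ch :: top :: rest
  | [] => [ch]

def openersB : List Char := ['[', '<', '(', '{']

def check_corrupted_alt (line : String) : String :=
  let stack := List.foldl stepB [] line.toList
  if stack = [] then line
  else if stack.all (fun c => openersB.contains c)
        || stack.all (fun c => !(openersB.contains c)) then ""
  else line

-- ===== PRECONDITION & SPEC =====
def Spec_check_corrupted (line : String) (out : String) : Prop := out = check_corrupted_alt line
instance (line : String) (out : String) : Decidable (Spec_check_corrupted line out) := by unfold Spec_check_corrupted; infer_instance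

-- ===== CLAIM (what is proved, stated in full; the proofs are below) =====
def Claim_equal_check_corrupted : Prop := ∀ (line : String), Dom_check_corrupted line → Spec_check_corrupted line (check_corrupted line)

-- ===== LEMMAS AND PROOFS =====

theorem foldl_snoc_eq_map {α β : Type} (f : α → β) (l : List α) (acc : List β) :
    l.foldl (fun acc x => acc ++ [f x]) acc = acc ++ l.map f := by
  induction l generalizing acc with
  | nil => simp
  | cons c t ih => simp [List.foldl, ih]

theorem stepB_open (st : List Char) (c : Char) (hc : pairsB c = none) :
    stepB st c = c :: st := by
  cases st with
  | nil => rfl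
  | cons top rest => simp [stepB, hc]

theorem myrepl_stack_inv (a b : Char) (ha : pairsB a = none) (hb : pairsB b = some a)
    (l : List Char) : ∀ st, List.foldl stepB st (myrepl a b l) = List.foldl stepB st l := by
  fun_induction myrepl a b l with
  | case1 => intro st; rfl
  | case2 => intro st; rfl
  | case3 c d t hp ih =>
    intro st
    have h1 : stepB st c = c :: st := by rw [hp.1]; exact stepB_open st a ha
    have h2 : stepB (c :: st) d = st := by
      rw [hp.1, hp.2]; simp [stepB, hb]
    simp only [List.foldl, h1, h2]
    exact ih st
  | case4 c d t hp ih =>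
    intro st
    simp only [List.foldl]
    exact ih (stepB st c)

theorem replaceA_stack_inv (l : List Char) :
    ∀ st, List.foldl stepB st (replaceA l) = List.foldl stepB st l := by
  intro st
  rw [replaceA_unfold]
  rw [myrepl_stack_inv '{' '}' rfl rfl, myrepl_stack_inv '(' ')' rfl rfl,
      myrepl_stack_inv '<' '>' rfl rfl, myrepl_stack_inv '[' ']' rfl rfl]

theorem myrepl_len_eq (a b : Char) (l : List Char)
    (h : (myrepl a b l).length = l.length) :
    myrepl a b l = l ∧ List.IsChain (fun c d => ¬(c = a ∧ d = b)) l := by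
  fun_induction myrepl a b l with
  | case1 => exact ⟨rfl, List.isChain_nil⟩
  | case2 => exact ⟨rfl, List.isChain_singleton _⟩
  | case3 c d t hp ih =>
    exfalso
    have := myrepl_len_le a b t
    simp at h; omega
  | case4 c d t hp ih =>
    simp at h
    obtain ⟨he, hc⟩ := ih h
    refine ⟨by rw [he], ?_⟩
    rw [List.isChain_cons]
    refine ⟨?_, hc⟩
    intro y hy
    simp at hy
    subst hy
    exact hp

theorem pairsB_some (c d : Char) (h : pairsB d = some c) :
    (c = '[' ∧ d = ']') ∨ (c = '<' ∧ d = '>') ∨ (c = '(' ∧ d = ')') ∨ (c = '{' ∧ d = '}') := by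
  unfold pairsB at h
  split_ifs at h with h1 h2 h3 h4
  · exact Or.inl ⟨(Option.some.inj h).symm, h1⟩
  · exact Or.inr (Or.inl ⟨(Option.some.inj h).symm, h2⟩)
  · exact Or.inr (Or.inr (Or.inl ⟨(Option.some.inj h).symm, h3⟩))
  · exact Or.inr (Or.inr (Or.inr ⟨(Option.some.inj h).symm, h4⟩))

theorem good_combine : ∀ l : List Char,
    List.IsChain (fun c d => ¬(c = '[' ∧ d = ']')) l →
    List.IsChain (fun c d => ¬(c = '<' ∧ d = '>')) l →
    List.IsChain (fun c d => ¬(c = '(' ∧ d = ')')) l →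
    List.IsChain (fun c d => ¬(c = '{' ∧ d = '}')) l →
    List.IsChain (fun c d => pairsB d ≠ some c) l := by
  intro l
  induction l with
  | nil => intro _ _ _ _; exact List.isChain_nil
  | cons c t ih =>
    intro h1 h2 h3 h4
    rw [List.isChain_cons] at h1 h2 h3 h4 ⊢
    refine ⟨?_, ih h1.2 h2.2 h3.2 h4.2⟩
    intro y hy hcontra
    rcases pairsB_some c y hcontra with h | h | h | h
    · exact h1.1 y hy h
    · exact h2.1 y hy h
    · exact h3.1 y hy h
    · exact h4.1 y hy h

theorem irred_run : ∀ (r : List Char) (st : List Char),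
    List.IsChain (fun c d => pairsB d ≠ some c) r →
    (∀ h c, st.head? = some h → r.head? = some c → pairsB c ≠ some h) →
    List.foldl stepB st r = r.reverse ++ st := by
  intro r
  induction r with
  | nil => intro st _ _; simp
  | cons c t ih =>
    intro st hch hbd
    have hpush : stepB st c = c :: st := by
      cases st with
      | nil => rfl
      | cons h rest =>
        have := hbd h c rfl rfl
        simp [stepB, this]
    rw [List.isChain_cons] at hch
    have := ih (c :: st) hch.2 (by
      intro h d hh hd
      simp at hh
      subst hh
      exact hch.1 d hd)
    simp only [List.foldl, hpush, this]
    simp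

theorem rekursionA_stack_inv (l : List Char) :
    ∀ st, List.foldl stepB st (rekursionA l) = List.foldl stepB st l := by
  fun_induction rekursionA l with
  | case1 line h => exact replaceA_stack_inv line
  | case2 line nl h ih =>
    intro st
    rw [ih st, replaceA_stack_inv line st]

theorem replaceA_fix (l : List Char) (h : (replaceA l).length = l.length) :
    List.IsChain (fun c d => pairsB d ≠ some c) l := by
  rw [replaceA_unfold] at h
  have k1 := myrepl_len_le '[' ']' l
  have k2 := myrepl_len_le '<' '>' (myrepl '[' ']' l)
  have k3 := myrepl_len_le '(' ')' (myrepl '<' '>' (myrepl '[' ']' l))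
  have k4 := myrepl_len_le '{' '}' (myrepl '(' ')' (myrepl '<' '>' (myrepl '[' ']' l)))
  have e1 : (myrepl '[' ']' l).length = l.length := by omega
  obtain ⟨q1, c1⟩ := myrepl_len_eq '[' ']' l e1
  rw [q1] at k2 k3 k4 h
  have e2 : (myrepl '<' '>' l).length = l.length := by omega
  obtain ⟨q2, c2⟩ := myrepl_len_eq '<' '>' l e2
  rw [q2] at k3 k4 h
  have e3 : (myrepl '(' ')' l).length = l.length := by omega
  obtain ⟨q3, c3⟩ := myrepl_len_eq '(' ')' l e3
  rw [q3] at k4 h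
  obtain ⟨q4, c4⟩ := myrepl_len_eq '{' '}' l h
  exact good_combine l c1 c2 c3 c4

theorem rekursionA_good (l : List Char) :
    List.IsChain (fun c d => pairsB d ≠ some c) (rekursionA l) := by
  fun_induction rekursionA l with
  | case1 line h =>
    have hl := replaceA_fix line h
    obtain ⟨q1, _⟩ := myrepl_len_eq '[' ']' line (by
      have k1 := myrepl_len_le '[' ']' line
      have := replaceA_len_le line
      -- from (replaceA line).length = line.length we get equality at the first stage too
      rw [replaceA_unfold] at h
      have k2 := myrepl_len_le '<' '>' (myrepl '[' ']' line)
      have k3 := myrepl_len_le '(' ')' (myrepl '<' '>' (myrepl '[' ']' line))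
      have k4 := myrepl_len_le '{' '}' (myrepl '(' ')' (myrepl '<' '>' (myrepl '[' ']' line)))
      omega)
    -- replaceA line = line, so the result is line itself
    have : replaceA line = line := by
      rw [replaceA_unfold, q1]
      obtain ⟨q2, _⟩ := myrepl_len_eq '<' '>' line (by
        rw [replaceA_unfold, q1] at h
        have k2 := myrepl_len_le '<' '>' line
        have k3 := myrepl_len_le '(' ')' (myrepl '<' '>' line)
        have k4 := myrepl_len_le '{' '}' (myrepl '(' ')' (myrepl '<' '>' line))
        omega)
      rw [q2]
      obtain ⟨q3, _⟩ := myrepl_len_eq '(' ')' line (by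
        rw [replaceA_unfold, q1, q2] at h
        have k3 := myrepl_len_le '(' ')' line
        have k4 := myrepl_len_le '{' '}' (myrepl '(' ')' line)
        omega)
      rw [q3]
      obtain ⟨q4, _⟩ := myrepl_len_eq '{' '}' line (by
        rw [replaceA_unfold, q1, q2, q3] at h
        omega)
      exact q4
    rw [this]
    exact hl
  | case2 line nl h ih => exact ih

theorem nodup_all_eq {α : Type} (S : List α) (v : α) (hn : S.Nodup)
    (hall : ∀ x ∈ S, x = v) (hv : v ∈ S) : S = [v] := by
  cases S with
  | nil => simp at hv
  | cons h t =>
    have hh : h = v := hall h (by simp)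
    subst hh
    cases t with
    | nil => rfl
    | cons y t' =>
      have hy : y = h := hall y (by simp)
      subst hy
      simp at hn

theorem ofList_const {α : Type} [DecidableEq α] (l : List α) (v : α)
    (hne : l ≠ []) (hall : ∀ x ∈ l, x = v) : PySem.Set.ofList l = [v] := by
  apply nodup_all_eq _ _ (PySem.Set.nodup_ofList l)
  · intro x hx
    exact hall x ((PySem.Set.mem_ofList l x).1 hx)
  · rcases List.exists_mem_of_ne_nil l hne with ⟨x, hx⟩
    rw [PySem.Set.mem_ofList]
    have := hall x hx
    subst this
    exact hx

-- ===== VERDICT (by name: the statement is the Claim_ definition above) =====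
theorem check_corrupted_spec : Claim_equal_check_corrupted := by
  intro line _
  unfold Spec_check_corrupted check_corrupted check_corrupted_alt
  obtain ⟨r, hrdef⟩ : ∃ r, rekursionA line.toList = r := ⟨_, rfl⟩
  have hgood : List.IsChain (fun c d => pairsB d ≠ some c) r :=
    hrdef ▸ rekursionA_good line.toList
  have hstack : List.foldl stepB [] line.toList = r.reverse := by
    rw [← rekursionA_stack_inv line.toList [], hrdef]
    rw [irred_run r [] hgood (by intro h c hh _; simp at hh)]
    simp
  rw [hrdef, hstack]
  simp only [foldl_snoc_eq_map, List.nil_append]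
  have hopeq : openA = openersB := rfl
  by_cases hnil : r = []
  · subst hnil
    simp [PySem.Set.ofList]
  · have hrev : ¬(r.reverse = []) := by simpa [List.reverse_eq_nil_iff] using hnil
    rw [if_neg hrev]
    by_cases hop : ∀ x ∈ r, openersB.contains x = true
    · have hmap : ∀ s ∈ r.map (fun x => if !(openA.contains x) then "x" else "y"), s = "y" := by
        intro s hs
        rcases List.mem_map.1 hs with ⟨x, hx, hfx⟩
        rw [hopeq, hop x hx] at hfx
        simpa using hfx.symm
      have hone : (PySem.Set.ofList (r.map (fun x => if !(openA.contains x) then "x" else "y"))).length = 1 := by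
        rw [ofList_const _ "y" (by simpa using hnil) hmap]
        rfl
      rw [if_pos hone]
      have hall : (r.reverse.all (fun c => openersB.contains c)
          || r.reverse.all (fun c => !(openersB.contains c))) = true := by
        rw [Bool.or_eq_true]
        left
        rw [List.all_eq_true]
        intro x hx
        exact hop x (List.mem_reverse.1 hx)
      rw [if_pos hall]
    · by_cases hcl : ∀ x ∈ r, openersB.contains x = false
      · have hmap : ∀ s ∈ r.map (fun x => if !(openA.contains x) then "x" else "y"), s = "x" := by
          intro s hs
          rcases List.mem_map.1 hs with ⟨x, hx, hfx⟩
          rw [hopeq, hcl x hx] at hfx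
          simpa using hfx.symm
        have hone : (PySem.Set.ofList (r.map (fun x => if !(openA.contains x) then "x" else "y"))).length = 1 := by
          rw [ofList_const _ "x" (by simpa using hnil) hmap]
          rfl
        rw [if_pos hone]
        have hall : (r.reverse.all (fun c => openersB.contains c)
            || r.reverse.all (fun c => !(openersB.contains c))) = true := by
          rw [Bool.or_eq_true]
          right
          rw [List.all_eq_true]
          intro x hx
          rw [hcl x (List.mem_reverse.1 hx)]
          rfl
        rw [if_pos hall]
      · -- mixed residue: both sides return `line`
        push Not at hop hcl
        rcases hop with ⟨x, hx, hxop⟩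
        rcases hcl with ⟨y, hy, hyop⟩
        have hxop' : openersB.contains x = false := by simpa using hxop
        have hyop' : openersB.contains y = true := by simpa using hyop
        have hxm : "x" ∈ PySem.Set.ofList (r.map (fun x => if !(openA.contains x) then "x" else "y")) := by
          rw [PySem.Set.mem_ofList]
          exact List.mem_map.2 ⟨x, hx, by rw [hopeq, hxop']; simp⟩
        have hym : "y" ∈ PySem.Set.ofList (r.map (fun x => if !(openA.contains x) then "x" else "y")) := by
          rw [PySem.Set.mem_ofList]
          exact List.mem_map.2 ⟨y, hy, by rw [hopeq, hyop']; simp⟩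
        have hlen : ¬((PySem.Set.ofList (r.map (fun x => if !(openA.contains x) then "x" else "y"))).length = 1) := by
          intro h1
          rcases List.length_eq_one_iff.1 h1 with ⟨z, hz⟩
          rw [hz] at hxm hym
          simp at hxm hym
          exact absurd (hxm.trans hym.symm) (by decide)
        rw [if_neg hlen]
        have hfalse : ¬((r.reverse.all (fun c => openersB.contains c)
            || r.reverse.all (fun c => !(openersB.contains c))) = true) := by
          have h1 : r.reverse.all (fun c => openersB.contains c) = false := by
            rw [List.all_eq_false]
            exact ⟨x, List.mem_reverse.2 hx, by simpa using hxop'⟩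
          have h2 : r.reverse.all (fun c => !(openersB.contains c)) = false := by
            rw [List.all_eq_false]
            exact ⟨y, List.mem_reverse.2 hy, by simpa using hyop'⟩
          rw [h1, h2]
          simp
        rw [if_neg hfalse]
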